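-- pv_equiv track=rewrite | github.com/prosvirninjr/trinity | .migration/src/core/tv/ru/tasks/local/logic.py | get_time_interval
-- ===== SOURCE A (Python) =====
-- def get_time_interval(time_str: str) -> str | None:
--     """
--     Возвращает предопределенный временной интервал на основе часа из строки времени.
--
--     Args:
--         time_str: Строка времени в формате "ЧЧ:ММ:СС" (24h).
--
--     Returns:
--         Строка временного интервала.
--     """
--     hours = int(time_str.split(':')[0])
--
--     # Определяем интервалы и соответствующие им строки
--     time_intervals = {
--         (6, 8): '06:00:00-09:00:00',
--         (9, 12): '09:00:00-13:00:00',
--         (13, 15): '13:00:00-16:00:00',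
--         (16, 18): '16:00:00-19:00:00',
--         (19, 21): '19:00:00-22:00:00',
--         (22, 23): '22:00:00-00:00:00',
--         (0, 5): '00:00:00-06:00:00',
--     }
--
--     # Ищем подходящий интервал
--     for (start_hour, end_hour), interval_str in time_intervals.items():
--         if start_hour <= hours <= end_hour:
--             return interval_str
--
--     raise ValueError('Не удалось определить временной интервал')
-- ===== SOURCE B (Python) =====
-- _TABLE = (['00:00:00-06:00:00'] * 6
--           + ['06:00:00-09:00:00'] * 3
--           + ['09:00:00-13:00:00'] * 4
--           + ['13:00:00-16:00:00'] * 3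
--           + ['16:00:00-19:00:00'] * 3
--           + ['19:00:00-22:00:00'] * 3
--           + ['22:00:00-00:00:00'] * 2)
--
--
-- def get_time_interval(time_str: str) -> str | None:
--     hours = int(time_str.split(':')[0])
--     if 0 <= hours <= 23:
--         return _TABLE[hours]
--     raise ValueError('Не удалось определить временной интервал')
-- ===== Notes on version B (the rewrite author's own statement) =====
-- stated objective: simpler
-- what changed: Replaces the linear scan over seven (start,end)->string ranges with a direct index into a precomputed flat 24-entry table keyed by hour.
import Mathlib
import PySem

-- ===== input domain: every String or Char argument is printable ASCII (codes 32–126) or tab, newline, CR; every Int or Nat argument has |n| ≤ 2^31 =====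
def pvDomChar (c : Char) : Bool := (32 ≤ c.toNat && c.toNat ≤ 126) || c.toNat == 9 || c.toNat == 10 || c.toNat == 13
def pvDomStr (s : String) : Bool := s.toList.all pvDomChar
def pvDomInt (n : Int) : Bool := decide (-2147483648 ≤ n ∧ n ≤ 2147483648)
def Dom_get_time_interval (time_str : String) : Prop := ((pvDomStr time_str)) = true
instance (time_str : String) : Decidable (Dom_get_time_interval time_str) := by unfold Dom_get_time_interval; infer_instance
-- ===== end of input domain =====

-- B replaces A's linear scan over seven hour ranges by a direct index into a flat
-- 24-entry table (objective: simpler).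

-- ===== PORT A =====
-- the dict iteration of A: scan the (start,end) -> interval pairs in insertion order
def gtiScan : List ((Int × Int) × String) → Int → String
  | [], _ => ""          -- A raises ValueError here; excluded by Pre_
  | ((a, b), s) :: rest, h => if a ≤ h ∧ h ≤ b then s else gtiScan rest h

def gtiIntervals : List ((Int × Int) × String) :=
  [((6, 8), "06:00:00-09:00:00"),
   ((9, 12), "09:00:00-13:00:00"),
   ((13, 15), "13:00:00-16:00:00"),
   ((16, 18), "16:00:00-19:00:00"),
   ((19, 21), "19:00:00-22:00:00"),
   ((22, 23), "22:00:00-00:00:00"),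
   ((0, 5), "00:00:00-06:00:00")]

def get_time_interval (time_str : String) : String :=
  match PySem.Int.ofStr? (PySem.List.pyGetD ((PySem.Str.split? time_str ":").getD []) 0 "") with
  | none => ""           -- int() raises ValueError here; excluded by Pre_
  | some hours => gtiScan gtiIntervals hours

-- ===== PORT B =====
def gtiTable : List String :=
  List.replicate 6 "00:00:00-06:00:00"
    ++ List.replicate 3 "06:00:00-09:00:00"
    ++ List.replicate 4 "09:00:00-13:00:00"
    ++ List.replicate 3 "13:00:00-16:00:00"
    ++ List.replicate 3 "16:00:00-19:00:00"
    ++ List.replicate 3 "19:00:00-22:00:00"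
    ++ List.replicate 2 "22:00:00-00:00:00"

def get_time_interval_alt (time_str : String) : String :=
  match PySem.Int.ofStr? (PySem.List.pyGetD ((PySem.Str.split? time_str ":").getD []) 0 "") with
  | none => ""           -- int() raises ValueError here; excluded by Pre_
  | some hours =>
      if 0 ≤ hours ∧ hours ≤ 23 then PySem.List.pyGetD gtiTable hours ""
      else ""            -- B raises ValueError here; excluded by Pre_

-- ===== PRECONDITION & SPEC =====
-- Pre_: the hour field parses as a Python int and lies in 0..23; elsewhere A raises ValueError.
def Pre_get_time_interval (time_str : String) : Prop :=
  ((PySem.Int.ofStr? (PySem.List.pyGetD ((PySem.Str.split? time_str ":").getD []) 0 "")).any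
    (fun hours => decide (0 ≤ hours ∧ hours ≤ 23))) = true

instance (time_str : String) : Decidable (Pre_get_time_interval time_str) := by
  unfold Pre_get_time_interval; infer_instance

def pvWitness_get_time_interval : String := "07:30:00"

def Spec_get_time_interval (time_str : String) (out : String) : Prop := out = get_time_interval_alt time_str
instance (time_str : String) (out : String) : Decidable (Spec_get_time_interval time_str out) := by unfold Spec_get_time_interval; infer_instance

-- ===== CLAIM (what is proved, stated in full; the proofs are below) =====
def Claim_equal_get_time_interval : Prop := ∀ (time_str : String), Dom_get_time_interval time_str → Pre_get_time_interval time_str → Spec_get_time_interval time_str (get_time_interval time_str)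

-- ===== LEMMAS AND PROOFS =====
-- hour-by-hour agreement of the range scan with the table lookup
lemma gtiScan_eq_table (h : Int) (h0 : 0 ≤ h) (h23 : h ≤ 23) :
    gtiScan gtiIntervals h = PySem.List.pyGetD gtiTable h "" := by
  interval_cases h <;> rfl

-- ===== VERDICT (by name: the statement is the Claim_ definition above) =====
theorem get_time_interval_spec : Claim_equal_get_time_interval := by
  intro s _ hpre
  unfold Pre_get_time_interval at hpre
  unfold Spec_get_time_interval get_time_interval get_time_interval_alt
  cases hh : PySem.Int.ofStr? (PySem.List.pyGetD ((PySem.Str.split? s ":").getD []) 0 "") with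
  | none => simp [hh] at hpre
  | some hours =>
      rw [hh] at hpre
      simp only [Option.any_some, decide_eq_true_eq] at hpre
      obtain ⟨h0, h23⟩ := hpre
      show gtiScan gtiIntervals hours =
        if 0 ≤ hours ∧ hours ≤ 23 then PySem.List.pyGetD gtiTable hours "" else ""
      rw [if_pos ⟨h0, h23⟩]
      exact gtiScan_eq_table hours h0 h23
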